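-- pv_equiv track=rewrite | github.com/MundVetter/hack | hack/ai-builder/modal_app/dataset_sumarizer.py | _select_split_for_example
-- ===== SOURCE A (Python) =====
-- from typing import Any, Dict, List, Optional, Union
--
-- def _select_split_for_example(splits: Dict[str, Dict[str, Optional[int]]]) -> str:
--     if not splits:
--         return "train"
--     # prefer the largest if counts exist; otherwise use common preference order
--     with_counts = [(n, info.get("num_examples")) for n, info in splits.items() if info.get("num_examples") is not None]
--     if with_counts:
--         with_counts.sort(key=lambda x: x[1] or 0, reverse=True)
--         return with_counts[0][0]
--     for preferred in ("train", "validation", "val", "dev", "test"):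
--         if preferred in splits:
--             return preferred
--     # else just the first
--     return next(iter(splits.keys()))
-- ===== SOURCE B (Python) =====
-- _PREFERRED = ("train", "validation", "val", "dev", "test")
--
-- def _select_split_for_example(splits):
--     # single pass: keep the first split whose count is strictly largest so far
--     best = None  # (name, count) of the best counted split seen so far
--     for name, info in splits.items():
--         count = info.get("num_examples")
--         if count is not None and (best is None or count > best[1]):
--             best = (name, count)
--     if best is not None:
--         return best[0]
--     for preferred in _PREFERRED:
--         if preferred in splits:
--             return preferred
--     return next(iter(splits), "train")
-- ===== Notes on version B (the rewrite author's own statement) =====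
-- stated objective: simpler
-- what changed: Replaces the build-list-then-stable-reverse-sort-and-take-head selection with a single running-max pass over the splits (strict '>' keeps the first maximal count, matching the stable sort's tie-break), and replaces the empty-dict guard by a defaulted next(iter(...), 'train') fallback.
import Mathlib
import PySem

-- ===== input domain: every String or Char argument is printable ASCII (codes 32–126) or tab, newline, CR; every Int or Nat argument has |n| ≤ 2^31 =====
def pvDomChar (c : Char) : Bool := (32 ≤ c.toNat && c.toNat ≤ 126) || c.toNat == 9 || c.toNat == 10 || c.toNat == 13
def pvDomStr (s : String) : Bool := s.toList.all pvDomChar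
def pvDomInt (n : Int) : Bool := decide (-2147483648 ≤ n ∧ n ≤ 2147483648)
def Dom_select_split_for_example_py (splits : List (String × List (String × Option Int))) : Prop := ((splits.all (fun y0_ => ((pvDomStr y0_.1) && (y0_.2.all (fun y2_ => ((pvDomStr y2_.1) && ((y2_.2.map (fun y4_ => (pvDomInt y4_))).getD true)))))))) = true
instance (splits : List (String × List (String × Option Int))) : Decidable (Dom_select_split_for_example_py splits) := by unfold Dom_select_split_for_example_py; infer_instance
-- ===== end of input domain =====

-- B replaces A's build-list-then-stable-reverse-sort-and-take-head selection by a single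
-- running-max pass (strict '>' preserves the stable sort's first-maximal tie-break); simpler.


-- shared primitive: Python's info.get("num_examples") on a dict with Optional[int] values
-- (missing key and a stored None both come out as none)
def pyGetNum (info : List (String × Option Int)) : Option Int :=
  ((PySem.Dict.mk info).get? "num_examples").getD none

-- Python's 'k in d' on the outer dict
def keyIn (splits : List (String × List (String × Option Int))) (k : String) : Bool :=
  splits.any (fun p => p.1 == k)

-- ===== PORT A =====
def select_split_for_example_py (splits : List (String × List (String × Option Int))) : String :=
  if splits = [] then "train"
  else
    let with_counts := splits.filterMap (fun p => (pyGetNum p.2).map (fun c => (p.1, c)))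
    if with_counts ≠ [] then
      -- with_counts.sort(key=lambda x: x[1] or 0, reverse=True); return with_counts[0][0]
      ((PySem.List.sorted with_counts (fun x => if x.2 = 0 then 0 else x.2) true).headD ("", 0)).1
    else
      if keyIn splits "train" then "train"
      else if keyIn splits "validation" then "validation"
      else if keyIn splits "val" then "val"
      else if keyIn splits "dev" then "dev"
      else if keyIn splits "test" then "test"
      else (splits.headD ("", [])).1  -- next(iter(splits.keys())); splits ≠ [] here

-- ===== PORT B =====
-- one loop-body step of B: keep the first strictly-largest counted split
def altStep (best : Option (String × Int)) (p : String × List (String × Option Int)) :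
    Option (String × Int) :=
  match pyGetNum p.2, best with
  | some c, none => some (p.1, c)
  | some c, some b => if c > b.2 then some (p.1, c) else some b
  | none, b => b

def select_split_for_example_py_alt (splits : List (String × List (String × Option Int))) : String :=
  match splits.foldl altStep none with
  | some b => b.1
  | none =>
    if keyIn splits "train" then "train"
    else if keyIn splits "validation" then "validation"
    else if keyIn splits "val" then "val"
    else if keyIn splits "dev" then "dev"
    else if keyIn splits "test" then "test"
    else match splits.head? with            -- next(iter(splits), "train")
         | some p => p.1
         | none => "train"

-- ===== PRECONDITION & SPEC =====
def Spec_select_split_for_example_py (splits : List (String × List (String × Option Int))) (out : String) : Prop := out = select_split_for_example_py_alt splits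
instance (splits : List (String × List (String × Option Int))) (out : String) : Decidable (Spec_select_split_for_example_py splits out) := by unfold Spec_select_split_for_example_py; infer_instance

-- ===== CLAIM (what is proved, stated in full; the proofs are below) =====
def Claim_equal_select_split_for_example_py : Prop := ∀ (splits : List (String × List (String × Option Int))), Dom_select_split_for_example_py splits → Spec_select_split_for_example_py splits (select_split_for_example_py splits)

-- ===== LEMMAS AND PROOFS =====

-- A's sort key 'x[1] or 0' is just x[1]
theorem keyA_eq (x : String × Int) : (if x.2 = 0 then (0 : Int) else x.2) = x.2 := by
  split <;> omega

-- head of one insertion step = one max?-fold step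
theorem head?_insertBy {α κ : Type} [LinearOrder κ] (key : α → κ) (x : α) (acc : List α) :
    (PySem.List.insertBy (fun a b => decide (key b < key a)) x acc).head? =
      (match acc.head? with
       | none => some x
       | some m => if key m < key x then some x else some m) := by
  cases acc with
  | nil => simp [PySem.List.insertBy]
  | cons y ys =>
    simp only [PySem.List.insertBy, List.head?_cons]
    by_cases h : key y < key x <;> simp [h]

-- head of the insertBy fold tracks the max?-fold state
theorem head?_foldl_insertBy {α κ : Type} [LinearOrder κ] (key : α → κ) (xs acc : List α) :
    (xs.foldl (fun acc x => PySem.List.insertBy (fun a b => decide (key b < key a)) x acc) acc).head? =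
      xs.foldl
        (fun st x =>
          match st with
          | none => some x
          | some m => if key m < key x then some x else some m)
        acc.head? := by
  induction xs generalizing acc with
  | nil => rfl
  | cons x t ih =>
    simp only [List.foldl_cons]
    rw [ih, head?_insertBy]

-- the head of a stable reverse sort is max(xs, key) — the FIRST element with maximal key
theorem head?_sorted_rev {α κ : Type} [LinearOrder κ] (xs : List α) (key : α → κ) :
    (PySem.List.sorted xs key true).head? = PySem.List.max? xs key := by
  rw [PySem.List.sorted_rev_eq_foldl_insertBy, PySem.List.max?, head?_foldl_insertBy]
  rfl

-- B's fold over splits is the max?-fold over A's with_counts list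
theorem foldl_altStep_eq (splits : List (String × List (String × Option Int)))
    (acc : Option (String × Int)) :
    splits.foldl altStep acc =
      (splits.filterMap (fun p => (pyGetNum p.2).map (fun c => (p.1, c)))).foldl
        (fun st x =>
          match st with
          | none => some x
          | some m => if m.2 < x.2 then some x else some m)
        acc := by
  induction splits generalizing acc with
  | nil => rfl
  | cons p t ih =>
    simp only [List.foldl_cons, List.filterMap_cons]
    cases h : pyGetNum p.2 with
    | none =>
      simp only [Option.map_none]
      rw [← ih]; congr 1
      simp [altStep, h]
    | some c =>
      simp only [Option.map_some, List.foldl_cons]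
      rw [← ih]; congr 1
      cases acc with
      | none => simp [altStep, h]
      | some b => simp [altStep, h, gt_iff_lt]

theorem foldl_altStep_eq_max? (splits : List (String × List (String × Option Int))) :
    splits.foldl altStep none =
      PySem.List.max? (splits.filterMap (fun p => (pyGetNum p.2).map (fun c => (p.1, c)))) (·.2) := by
  rw [foldl_altStep_eq, PySem.List.max?]
  congr 1
  funext st x
  cases st <;> simp

-- ===== VERDICT (by name: the statement is the Claim_ definition above) =====
theorem select_split_for_example_py_spec : Claim_equal_select_split_for_example_py := by
  intro splits _
  unfold Spec_select_split_for_example_py select_split_for_example_py select_split_for_example_py_alt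
  by_cases hnil : splits = []
  · subst hnil; rfl
  · simp only [hnil, if_false, ne_eq]
    set wc := splits.filterMap (fun p => (pyGetNum p.2).map (fun c => (p.1, c))) with hwc
    have hkey : PySem.List.sorted wc (fun x => if x.2 = 0 then 0 else x.2) true
        = PySem.List.sorted wc (fun x => x.2) true := by
      congr 1; funext x; exact keyA_eq x
    by_cases hwe : wc = []
    · have hb : splits.foldl altStep none = none := by
        rw [foldl_altStep_eq_max?, ← hwc, hwe]; rfl
      simp only [hwe, not_true_eq_false, if_false, hb]
      cases hs : splits with
      | nil => exact absurd hs hnil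
      | cons q t => subst hs; simp
    · have hb : splits.foldl altStep none = (PySem.List.sorted wc (fun x => x.2) true).head? := by
        rw [foldl_altStep_eq_max?, ← hwc, head?_sorted_rev]
      cases hsrt : PySem.List.sorted wc (fun x => x.2) true with
      | nil => exact absurd ((PySem.List.sorted_eq_nil_iff wc _ true).mp hsrt) hwe
      | cons m t =>
        have : splits.foldl altStep none = some m := by rw [hb, hsrt]; rfl
        simp only [hwe, not_false_eq_true, if_true, this, hkey, hsrt, List.headD_cons]
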